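-- pv_equiv track=rewrite | github.com/tnscjf3146/soon_cheul | python_my/lunch_time_swea_2383/main.py | calc
-- ===== SOURCE A (Python) =====
-- def calc(arr, slen):
--     if not arr:
--         return 0
--
--     finish = []
--     arr.sort()
--
--     for i in range(len(arr)):
--         if i < 3:
--             start = arr[i]
--
--         else:
--             start = max(arr[i], finish[i - 3])
--
--         finish.append(start + slen)
--
--     return finish[-1]
-- ===== SOURCE B (Python) =====
-- def calc(arr, slen):
--     if not arr:
--         return 0
--     arr.sort()
--     n = len(arr)
--     j = (n - 1) % 3
--     t = arr[j] + slen
--     i = j + 3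
--     while i < n:
--         t = max(arr[i], t) + slen
--         i += 3
--     return t
-- ===== Notes on version B (the rewrite author's own statement) =====
-- stated objective: alternative
-- what changed: Instead of building the full finish array with finish[i] = max(arr[i], finish[i-3]) + slen for every i, B walks only the single per-machine chain of slot (n-1)%3 (indices j, j+3, ...) with one running value, since finish[-1] depends only on that chain.
import Mathlib
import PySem

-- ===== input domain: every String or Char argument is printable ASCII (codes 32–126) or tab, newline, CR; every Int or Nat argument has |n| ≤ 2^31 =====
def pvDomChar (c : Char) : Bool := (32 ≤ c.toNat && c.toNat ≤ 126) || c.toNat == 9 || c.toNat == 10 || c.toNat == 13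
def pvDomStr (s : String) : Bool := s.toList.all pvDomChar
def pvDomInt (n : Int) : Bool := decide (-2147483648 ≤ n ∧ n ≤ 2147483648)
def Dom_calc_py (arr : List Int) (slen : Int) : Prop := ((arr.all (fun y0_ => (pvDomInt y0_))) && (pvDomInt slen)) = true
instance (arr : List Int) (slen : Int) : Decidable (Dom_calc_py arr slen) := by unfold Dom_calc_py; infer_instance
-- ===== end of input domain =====

-- B replaces A's full finish-array recurrence by a single per-machine chain walk for slot
-- (n-1)%3; both Pythons sort arr in place (same observable mutation), the claim is about
-- the return value.

-- ===== PORT A =====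
-- loop body of A: one iteration of 'for i in range(len(arr))'
def calcStep (s : List Int) (slen : Int) (finish : List Int) (i : Nat) : List Int :=
  finish ++
    [(if i < 3 then (PySem.List.pyGet? s (i : Int)).getD 0
      else max ((PySem.List.pyGet? s (i : Int)).getD 0)
               ((PySem.List.pyGet? finish ((i : Int) - 3)).getD 0)) + slen]

def calc_py (arr : List Int) (slen : Int) : Int :=
  if arr = [] then 0
  else
    let s := PySem.List.sorted arr (fun x => x) false
    let finish := (List.range s.length).foldl (calcStep s slen) []
    (PySem.List.pyGet? finish (-1)).getD 0

-- ===== PORT B =====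
-- the while-loop of Source B: t = max(arr[i], t) + slen; i += 3
def calcChain (s : List Int) (slen : Int) (n i : Nat) (t : Int) : Int :=
  if i < n then
    calcChain s slen n (i + 3) (max ((PySem.List.pyGet? s (i : Int)).getD 0) t + slen)
  else t
termination_by n - i
decreasing_by omega

def calc_py_alt (arr : List Int) (slen : Int) : Int :=
  if arr = [] then 0
  else
    let s := PySem.List.sorted arr (fun x => x) false
    let n := s.length
    let j := (n - 1) % 3
    calcChain s slen n (j + 3) ((PySem.List.pyGet? s (j : Int)).getD 0 + slen)

-- ===== PRECONDITION & SPEC =====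
def Spec_calc_py (arr : List Int) (slen : Int) (out : Int) : Prop := out = calc_py_alt arr slen
instance (arr : List Int) (slen : Int) (out : Int) : Decidable (Spec_calc_py arr slen out) := by unfold Spec_calc_py; infer_instance

-- ===== CLAIM (what is proved, stated in full; the proofs are below) =====
def Claim_equal_calc_py : Prop := ∀ (arr : List Int) (slen : Int), Dom_calc_py arr slen → Spec_calc_py arr slen (calc_py arr slen)

-- ===== LEMMAS AND PROOFS =====

-- the finish-time recurrence both programs compute
def pvF (s : List Int) (slen : Int) (i : Nat) : Int :=
  if i < 3 then (PySem.List.pyGet? s (i : Int)).getD 0 + slen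
  else max ((PySem.List.pyGet? s (i : Int)).getD 0) (pvF s slen (i - 3)) + slen
termination_by i
decreasing_by omega

theorem pvF_step (s : List Int) (slen : Int) (i : Nat) :
    max ((PySem.List.pyGet? s ((i + 3 : Nat) : Int)).getD 0) (pvF s slen i) + slen
      = pvF s slen (i + 3) := by
  conv_rhs => rw [pvF]
  rw [if_neg (by omega)]
  simp

theorem chain_eq (s : List Int) (slen : Int) (n : Nat) :
    ∀ k i, n - i ≤ k → i < n → (n - 1 - i) % 3 = 0 →
      calcChain s slen n (i + 3) (pvF s slen i) = pvF s slen (n - 1) := by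
  intro k
  induction k with
  | zero => intro i h1 h2 _; omega
  | succ k ih =>
    intro i hk hi h3
    rw [calcChain]
    by_cases h : i + 3 < n
    · rw [if_pos h, pvF_step]
      exact ih (i + 3) (by omega) h (by omega)
    · rw [if_neg h]
      have : i = n - 1 := by omega
      rw [this]

theorem finish_eq (s : List Int) (slen : Int) :
    ∀ k, (List.range k).foldl (calcStep s slen) [] = (List.range k).map (pvF s slen) := by
  intro k
  induction k with
  | zero => simp
  | succ k ih =>
    have hstart :
        (if k < 3 then (PySem.List.pyGet? s (k : Int)).getD 0
         else max ((PySem.List.pyGet? s (k : Int)).getD 0)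
                  ((PySem.List.pyGet? ((List.range k).map (pvF s slen))
                      ((k : Int) - 3)).getD 0)) + slen = pvF s slen k := by
      by_cases h : k < 3
      · rw [if_pos h]
        conv_rhs => rw [pvF]
        rw [if_pos h]
      · rw [if_neg h]
        have hcast : (k : Int) - 3 = ((k - 3 : Nat) : Int) := by omega
        have hlt : k - 3 < ((List.range k).map (pvF s slen)).length := by simp; omega
        rw [hcast]
        conv_rhs => rw [pvF]
        rw [if_neg h]
        simp only [PySem.List.pyGet?_natCast, List.getElem?_eq_getElem hlt,
          Option.getD_some, List.getElem_map, List.getElem_range]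
    rw [List.range_succ, List.foldl_append, ih, List.map_append, List.map_cons, List.map_nil,
        List.foldl_cons, List.foldl_nil, calcStep, hstart]

theorem calc_py_spec : Claim_equal_calc_py := by
  intro arr slen _
  unfold Spec_calc_py
  simp only [calc_py, calc_py_alt]
  by_cases he : arr = []
  · rw [if_pos he, if_pos he]
  · rw [if_neg he, if_neg he]
    have hn : 0 < (PySem.List.sorted arr (fun x => x) false).length := by
      rw [PySem.List.length_sorted]
      exact List.length_pos_iff.mpr he
    generalize hg : PySem.List.sorted arr (fun x => x) false = s at hn ⊢
    rw [finish_eq]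
    have hstart : (PySem.List.pyGet? s (((s.length - 1) % 3 : Nat) : Int)).getD 0 + slen
        = pvF s slen ((s.length - 1) % 3) := by
      rw [pvF, if_pos (Nat.mod_lt _ (by norm_num))]
    rw [hstart,
        chain_eq s slen s.length s.length ((s.length - 1) % 3) (by omega) (by omega) (by omega),
        PySem.List.pyGet?_neg_one, List.getLast?_eq_getElem?, List.length_map, List.length_range,
        List.getElem?_eq_getElem (by simp; omega)]
    simp only [Option.getD_some, List.getElem_map, List.getElem_range]
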